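-- pv_equiv track=rewrite | github.com/sooham/sooham.github.io | source/_posts/NYT-Letter-Boxed-investigation/filter_dictionary.py | is_invalid_word
-- ===== SOURCE A (Python) =====
-- def is_invalid_word(word):
--
--     if len(word) < 3:
--         return True
--
--     # words with same ajacent letters are invalid
--     if any(word[i] == word[i + 1] for i in range(len(word) - 1)):
--         return True
--
--     if any(word[i] not in 'abcdefghijklmnopqrstuvwxyz' for i in range(len(word))):
--         return True
--
--     return False
-- ===== SOURCE B (Python) =====
-- def is_invalid_word(word):
--     # Inverted iteration: instead of scanning the word's indices, scan the
--     # ALPHABET — a word has equal adjacent letters iff it contains some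
--     # doubled-letter substring 'aa'..'zz' (any doubled non-letter char is
--     # already caught by the alphabet test), and it is all-lowercase iff
--     # deleting every lowercase letter (str.translate) leaves nothing.
--     lower = 'abcdefghijklmnopqrstuvwxyz'
--     return (len(word) < 3
--             or any(c + c in word for c in lower)
--             or word.translate({ord(c): None for c in lower}) != '')
-- ===== Notes on version B (the rewrite author's own statement) =====
-- stated objective: alternative
-- what changed: Inverts the iteration: instead of A's two indexed scans over the word, B loops over the 26-letter alphabet testing doubled-letter substring containment ('cc' in word) for the adjacency rule, and checks the alphabet rule by deleting all lowercase letters with str.translate and testing that the residue is empty; no index arithmetic over the word remains.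
import Mathlib
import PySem

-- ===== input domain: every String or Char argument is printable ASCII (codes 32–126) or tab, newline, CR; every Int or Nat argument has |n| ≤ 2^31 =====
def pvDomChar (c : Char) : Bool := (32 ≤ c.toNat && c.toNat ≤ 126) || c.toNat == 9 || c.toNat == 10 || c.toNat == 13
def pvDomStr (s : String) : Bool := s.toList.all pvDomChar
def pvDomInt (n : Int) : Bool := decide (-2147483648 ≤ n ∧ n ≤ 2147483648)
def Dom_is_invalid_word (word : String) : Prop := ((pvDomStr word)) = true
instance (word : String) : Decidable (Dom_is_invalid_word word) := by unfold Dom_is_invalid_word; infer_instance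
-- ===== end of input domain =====

-- B inverts the iteration: it loops over the 26-letter alphabet testing doubled-letter substring
-- containment for the adjacency rule and deletes all lowercase letters (translate) for the alphabet
-- rule, instead of A's two indexed scans over the word; equivalence is proved below.

-- ===== PORT A =====
def pvLower : List Char := "abcdefghijklmnopqrstuvwxyz".toList

def is_invalid_word (word : String) : Bool :=
  let cs := word.toList
  if PySem.Chars.len cs < 3 then true
  else if (PySem.List.pyRange 0 ((cs.length : Int) - 1) 1).any
      (fun i => PySem.List.pyGetD cs i 'a' == PySem.List.pyGetD cs (i + 1) 'a') then true
  -- word[i] not in 'abc…z': single-character substring membership; pyGetD is exact here,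
  -- every generated index is in range so Python's word[i] never raises
  else if (PySem.List.pyRange 0 (cs.length : Int) 1).any
      (fun i => !(PySem.Chars.isIn [PySem.List.pyGetD cs i 'a'] pvLower)) then true
  else false

-- ===== PORT B =====
def pvAlphabet : List Char := "abcdefghijklmnopqrstuvwxyz".toList

def is_invalid_word_alt (word : String) : Bool :=
  let cs := word.toList
  -- len(word) < 3  or  any(c + c in word for c in lower)  or  word.translate(…) != ''
  -- word.translate({ord(c): None for c in lower}) deletes exactly the lowercase letters;
  -- ported as a filter keeping the non-lowercase characters (exact)
  decide (PySem.Chars.len cs < 3)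
    || pvAlphabet.any (fun c => PySem.Chars.isIn [c, c] cs)
    || !(cs.filter (fun ch => !(pvAlphabet.contains ch))).isEmpty

-- ===== PRECONDITION & SPEC =====
def Spec_is_invalid_word (word : String) (out : Bool) : Prop := out = is_invalid_word_alt word
instance (word : String) (out : Bool) : Decidable (Spec_is_invalid_word word out) := by unfold Spec_is_invalid_word; infer_instance

-- ===== CLAIM (what is proved, stated in full; the proofs are below) =====
def Claim_equal_is_invalid_word : Prop := ∀ (word : String), Dom_is_invalid_word word → Spec_is_invalid_word word (is_invalid_word word)

-- ===== LEMMAS AND PROOFS =====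

-- membership in the lowercase alphabet is the interval test
theorem pv_mem_lower (c : Char) : c ∈ pvLower ↔ ('a' ≤ c ∧ c ≤ 'z') := by
  have hv : ∀ d : Char, c = d ↔ c.val.toNat = d.val.toNat := fun d => by
    rw [Char.ext_iff]; exact UInt32.toNat_inj.symm
  rw [show pvLower = ['a', 'b', 'c', 'd', 'e', 'f', 'g', 'h', 'i', 'j', 'k', 'l', 'm', 'n', 'o', 'p', 'q', 'r', 's', 't', 'u', 'v', 'w', 'x', 'y', 'z'] from by decide]
  simp only [List.mem_cons, List.not_mem_nil, or_false, hv, Char.le_def,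
    UInt32.le_iff_toNat_le, show ('a':Char).val.toNat = 97 from rfl, show ('b':Char).val.toNat = 98 from rfl, show ('c':Char).val.toNat = 99 from rfl, show ('d':Char).val.toNat = 100 from rfl, show ('e':Char).val.toNat = 101 from rfl, show ('f':Char).val.toNat = 102 from rfl, show ('g':Char).val.toNat = 103 from rfl, show ('h':Char).val.toNat = 104 from rfl, show ('i':Char).val.toNat = 105 from rfl, show ('j':Char).val.toNat = 106 from rfl, show ('k':Char).val.toNat = 107 from rfl, show ('l':Char).val.toNat = 108 from rfl, show ('m':Char).val.toNat = 109 from rfl, show ('n':Char).val.toNat = 110 from rfl, show ('o':Char).val.toNat = 111 from rfl, show ('p':Char).val.toNat = 112 from rfl, show ('q':Char).val.toNat = 113 from rfl, show ('r':Char).val.toNat = 114 from rfl, show ('s':Char).val.toNat = 115 from rfl, show ('t':Char).val.toNat = 116 from rfl, show ('u':Char).val.toNat = 117 from rfl, show ('v':Char).val.toNat = 118 from rfl, show ('w':Char).val.toNat = 119 from rfl, show ('x':Char).val.toNat = 120 from rfl, show ('y':Char).val.toNat = 121 from rfl, show ('z':Char).val.toNat = 122 from rfl]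
  omega

-- single-character substring membership (A's alphabet test) is the interval test
theorem pv_isIn_lower (c : Char) : PySem.Chars.isIn [c] pvLower = ('a' ≤ c && c ≤ 'z') := by
  by_cases h : PySem.Chars.isIn [c] pvLower = true
  · rw [h]
    have := (PySem.Chars.isIn_iff_infix [c] pvLower).mp h
    rw [List.singleton_infix_iff, pv_mem_lower] at this
    simp [this.1, this.2]
  · rw [Bool.not_eq_true] at h
    rw [h]
    have := (PySem.Chars.isIn_eq_false_iff [c] pvLower).mp h
    rw [List.singleton_infix_iff, pv_mem_lower] at this
    rw [Decidable.not_and_iff_or_not] at this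
    rcases this with h1 | h1 <;> simp [h1]

-- B's list.contains (translate's deletion set) is the interval test
theorem pv_contains_lower (c : Char) : pvAlphabet.contains c = ('a' ≤ c && c ≤ 'z') := by
  have h : pvAlphabet = pvLower := rfl
  rw [Bool.eq_iff_iff, h, List.contains_iff_mem, pv_mem_lower]
  cases hc1 : decide ('a' ≤ c) <;> cases hc2 : decide (c ≤ 'z') <;>
    simp_all

-- A's index-ranged adjacency scan is the zip-with-tail scan
theorem pvAdj_eq (cs : List Char) :
    (PySem.List.pyRange 0 ((cs.length : Int) - 1) 1).any
        (fun i => PySem.List.pyGetD cs i 'a' == PySem.List.pyGetD cs (i + 1) 'a')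
      = (cs.zip cs.tail).any (fun pr => pr.1 == pr.2) := by
  rw [Bool.eq_iff_iff, List.any_eq_true, List.any_eq_true]
  constructor
  · rintro ⟨i, hi, hp⟩
    rw [PySem.List.mem_pyRange_one] at hi
    have hk1 : i.toNat + 1 < cs.length := by omega
    rw [PySem.List.pyGetD_eq_getElem cs 'a' hi.1 (by omega),
        PySem.List.pyGetD_eq_getElem cs 'a' (by omega) (by omega)] at hp
    simp only [show (i + 1).toNat = i.toNat + 1 from by omega] at hp
    have hzlen : i.toNat < (cs.zip cs.tail).length := by
      simp only [List.length_zip, List.length_tail]; omega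
    refine ⟨(cs.zip cs.tail)[i.toNat], List.getElem_mem hzlen, ?_⟩
    rw [List.getElem_zip, List.getElem_tail]
    exact hp
  · rintro ⟨pr, hpr, hp⟩
    obtain ⟨k, hk, hget⟩ := List.getElem_of_mem hpr
    rw [List.getElem_zip, List.getElem_tail] at hget
    subst hget
    have hklen : k + 1 < cs.length := by
      simp only [List.length_zip, List.length_tail] at hk; omega
    refine ⟨(k : Int), ?_, ?_⟩
    · rw [PySem.List.mem_pyRange_one]; omega
    · rw [PySem.List.pyGetD_eq_getElem cs 'a' (by omega) (by omega),
          PySem.List.pyGetD_eq_getElem cs 'a' (by omega) (by omega)]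
      simp only [show ((k : Int)).toNat = k from by omega,
        show ((k : Int) + 1).toNat = k + 1 from by omega]
      exact hp

-- A's index-ranged alphabet scan is a direct scan of the characters
theorem pvBad_eq (cs : List Char) :
    (PySem.List.pyRange 0 (cs.length : Int) 1).any
        (fun i => !(PySem.Chars.isIn [PySem.List.pyGetD cs i 'a'] pvLower))
      = cs.any (fun c => !('a' ≤ c && c ≤ 'z')) := by
  have h := PySem.List.map_pyGetD_pyRange_zero' cs 'a'
  calc (PySem.List.pyRange 0 (cs.length : Int) 1).any
        (fun i => !(PySem.Chars.isIn [PySem.List.pyGetD cs i 'a'] pvLower))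
      = ((PySem.List.pyRange 0 (cs.length : Int) 1).map
          (fun j => PySem.List.pyGetD cs j 'a')).any
          (fun c => !(PySem.Chars.isIn [c] pvLower)) := by rw [List.any_map]; rfl
    _ = cs.any (fun c => !(PySem.Chars.isIn [c] pvLower)) := by rw [h]
    _ = cs.any (fun c => !('a' ≤ c && c ≤ 'z')) := by simp [pv_isIn_lower]

-- a doubled-letter infix is exactly an equal adjacent pair
theorem pv_dup_infix_iff (c : Char) (cs : List Char) :
    [c, c] <:+: cs ↔ ∃ pr ∈ cs.zip cs.tail, pr = (c, c) := by
  induction cs with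
  | nil => simp
  | cons a t ih =>
    rw [List.infix_cons_iff, ih]
    cases t with
    | nil =>
      simp only [List.zip_nil_right, List.tail_cons]
      constructor
      · rintro (hp | h)
        · exact absurd (hp.length_le) (by simp)
        · simp at h
      · rintro ⟨pr, hpr, _⟩; simp at hpr
    | cons b t' =>
      simp only [List.tail_cons, List.zip_cons_cons, List.mem_cons]
      constructor
      · rintro (hp | ⟨pr, hpr, he⟩)
        · rcases List.cons_prefix_cons.mp hp with ⟨h1, hp2⟩
          rcases List.cons_prefix_cons.mp hp2 with ⟨h2, _⟩
          exact ⟨(a, b), Or.inl rfl, by simp [← h1, ← h2]⟩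
        · exact ⟨pr, Or.inr hpr, he⟩
      · rintro ⟨pr, (hpr | hpr), he⟩
        · left
          rw [he] at hpr
          obtain ⟨h1, h2⟩ := Prod.mk.inj hpr
          rw [← h1, ← h2]
          exact List.cons_prefix_cons.mpr ⟨rfl, List.cons_prefix_cons.mpr ⟨rfl, by simp⟩⟩
        · exact Or.inr ⟨pr, hpr, he⟩

-- the filter residue is nonempty iff some character is not lowercase
theorem pv_residue_eq (cs : List Char) :
    (!(cs.filter (fun ch => !(pvAlphabet.contains ch))).isEmpty)
      = cs.any (fun c => !('a' ≤ c && c ≤ 'z')) := by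
  simp only [pv_contains_lower]
  induction cs with
  | nil => rfl
  | cons c t ih =>
    simp only [List.filter_cons, List.any_cons]
    cases h : ('a' ≤ c && c ≤ 'z') with
    | false => simp
    | true =>
      simp only [Bool.not_true, Bool.false_eq_true, if_false, Bool.false_or]
      exact ih

-- the two adjacency/alphabet disjunctions agree
theorem pv_main (cs : List Char) :
    ((cs.zip cs.tail).any (fun pr => pr.1 == pr.2) || cs.any (fun c => !('a' ≤ c && c ≤ 'z')))
      = (pvAlphabet.any (fun c => PySem.Chars.isIn [c, c] cs)
          || cs.any (fun c => !('a' ≤ c && c ≤ 'z'))) := by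
  cases hbad : cs.any (fun c => !('a' ≤ c && c ≤ 'z')) with
  | true => simp
  | false =>
    simp only [Bool.or_false]
    rw [Bool.eq_iff_iff]
    simp only [List.any_eq_true]
    have hall : ∀ c ∈ cs, ('a' ≤ c ∧ c ≤ 'z') := by
      intro c hc
      have := (List.any_eq_false).mp hbad c hc
      simp only [Bool.not_eq_true', Bool.and_eq_false_iff] at this
      constructor <;> by_contra h <;> simp_all
    constructor
    · rintro ⟨pr, hpr, hp⟩
      have hx : pr.1 = pr.2 := by simp at hp; exact hp
      have h1 : pr.1 ∈ cs := by
        obtain ⟨k, hk, hg⟩ := List.getElem_of_mem hpr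
        rw [List.getElem_zip] at hg
        rw [← hg]
        exact List.getElem_mem (by simp only [List.length_zip] at hk; omega)
      refine ⟨pr.1, (pv_mem_lower pr.1).mpr (hall _ h1), ?_⟩
      rw [PySem.Chars.isIn_iff_infix, pv_dup_infix_iff]
      exact ⟨pr, hpr, by rw [Prod.ext_iff]; exact ⟨rfl, hx.symm⟩⟩
    · rintro ⟨c, _, hc⟩
      rw [PySem.Chars.isIn_iff_infix, pv_dup_infix_iff] at hc
      obtain ⟨pr, hpr, he⟩ := hc
      exact ⟨pr, hpr, by simp [he]⟩

-- ===== VERDICT (by name: the statement is the Claim_ definition above) =====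
theorem is_invalid_word_spec : Claim_equal_is_invalid_word := by
  intro word _
  unfold Spec_is_invalid_word is_invalid_word is_invalid_word_alt
  simp only [pvAdj_eq, pvBad_eq, pv_residue_eq, Bool.or_assoc, ← pv_main]
  split_ifs with h1 h2 h3
  · rw [decide_eq_true h1, Bool.true_or]
  · rw [h2, Bool.true_or, Bool.or_true]
  · rw [h3, Bool.or_true, Bool.or_true]
  · rw [decide_eq_false h1]
    simp only [Bool.not_eq_true] at h2 h3
    rw [h2, h3, Bool.false_or, Bool.or_false]
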